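-- pv_equiv track=rewrite | github.com/LorenFiorini/Competitive-Programming | codeForces/129/d.py | dfs
-- ===== SOURCE A (Python) =====
-- def get(num):
-- 	ans = set()
-- 	while num > 0:
-- 		if num % 10 > 1:
-- 			ans.add(num % 10)
-- 		num //= 10
-- 	ls = list(ans)
-- 	ls.sort(reverse = True)
-- 	return ls
--
-- def dfs(n, num, cnt):
-- 	sz = len(str(num))
-- 	if sz == n:
-- 		return cnt
-- 	elif sz > n:
-- 		return int(1e9)
--
-- 	ans = int(1e9)
-- 	ls = get(num)
-- 	for val in ls:
-- 		res = dfs(n, num * val, cnt+1)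
-- 		if res < ans:
-- 			ans = res
--
-- 	return ans
-- ===== SOURCE B (Python) =====
-- def dfs(n, num, cnt):
--     INF = int(1e9)
--     sz0 = len(str(num))
--     if sz0 == n:
--         return cnt
--     if sz0 > n:
--         return INF
--
--     memo = {}
--
--     def steps(x):
--         # minimal number of multiplications to turn x into an n-digit number,
--         # or None if impossible; memoized on x
--         sz = len(str(x))
--         if sz == n:
--             return 0
--         if sz > n:
--             return None
--         if x in memo:
--             return memo[x]
--         digs = []
--         y = x
--         while y > 0:
--             if y % 10 > 1:
--                 digs.append(y % 10)
--             y //= 10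
--         best = None
--         for d in digs:
--             r = steps(x * d)
--             if r is not None:
--                 r += 1
--                 if best is None or r < best:
--                     best = r
--         memo[x] = best
--         return best
--
--     s = steps(num)
--     if s is None:
--         return INF
--     return min(INF, cnt + s)
-- ===== Notes on version B (the rewrite author's own statement) =====
-- stated objective: faster
-- what changed: B replaces A's unmemoized exponential search (which re-explores every multiplication path, threading cnt and the 1e9 cap through every recursive call) by a memoized DP on the reachable number alone: steps(x) computes the minimal number of multiplications (None if unreachable) once per distinct state, and cnt and the 1e9 cap are applied once at the top.
import Mathlib
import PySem

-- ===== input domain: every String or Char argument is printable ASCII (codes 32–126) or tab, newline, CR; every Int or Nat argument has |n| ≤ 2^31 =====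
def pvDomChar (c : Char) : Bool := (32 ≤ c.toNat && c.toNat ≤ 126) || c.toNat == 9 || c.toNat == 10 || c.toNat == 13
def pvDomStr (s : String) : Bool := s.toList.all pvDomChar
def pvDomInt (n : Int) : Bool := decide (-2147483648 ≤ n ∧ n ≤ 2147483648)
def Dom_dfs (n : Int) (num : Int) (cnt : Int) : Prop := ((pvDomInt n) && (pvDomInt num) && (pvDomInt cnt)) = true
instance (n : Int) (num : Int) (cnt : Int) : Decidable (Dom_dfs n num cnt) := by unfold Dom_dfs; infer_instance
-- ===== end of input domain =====

-- B replaces A's exponential unmemoized search by a memoized DP on the reachable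
-- number alone (minimal multiplication count, cnt and the 10^9 cap applied once at
-- the top); intended as faster: a timing run saw A time out from n=16 where B
-- still returned, but could not confirm a clean ratio (B's state space is also
-- heavy at much larger n).

-- ===== PORT A =====
-- len(str(x))
def pvSz (x : Int) : Int := PySem.Str.len (PySem.Int.toStr x)

-- the 'while num > 0' loop of get, building the set 'ans'; the Nat argument is
-- fuel (a totality guard only: num.toNat + 1 iterations always suffice, the
-- loop divides num by 10 each pass)
def pvGetLoopF : Nat → Int → PySem.Set Int → PySem.Set Int
  | 0, _, ans => ans
  | f + 1, num, ans =>
    if 0 < num then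
      pvGetLoopF f (PySem.Int.floordiv num 10)
        (if 1 < PySem.Int.mod num 10 then PySem.Set.add ans (PySem.Int.mod num 10) else ans)
    else ans

def pvGetLoop (num : Int) (ans : PySem.Set Int) : PySem.Set Int :=
  pvGetLoopF (num.toNat + 1) num ans

-- get: ls = list(ans); ls.sort(reverse=True).  list(set) iteration order is not
-- modelled, but it is immediately sorted (distinct ints, identity key), so the
-- sorted result is exact.
def pvGet (num : Int) : List Int :=
  PySem.List.sorted (pvGetLoop num PySem.Set.empty) (fun x => x) true

-- dfs, with a fuel argument as totality guard: every recursive call multiplies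
-- num (≥ 1) by a digit ≥ 2 while num stays below 10^n, so the recursion depth
-- is under 4*n+5 and the top-level fuel below never runs out (proved in the
-- lemmas); fuel 0 is unreachable from dfs
def dfsF : Nat → Int → Int → Int → Int
  | 0, _, _, _ => 1000000000
  | f + 1, n, num, cnt =>
    let sz := pvSz num
    if sz = n then cnt
    else if sz > n then 1000000000
    else
      (pvGet num).foldl
        (fun ans v =>
          let res := dfsF f n (num * v) (cnt + 1)
          if res < ans then res else ans) 1000000000

def dfs (n : Int) (num : Int) (cnt : Int) : Int := dfsF (4 * n.toNat + 5) n num cnt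

-- ===== PORT B =====
-- the digit list B's while loop extracts (units digit first, duplicates kept);
-- fuel as above
def pvDigsF : Nat → Int → List Int
  | 0, _ => []
  | f + 1, y =>
    if 0 < y then
      (if 1 < PySem.Int.mod y 10 then [PySem.Int.mod y 10] else [])
        ++ pvDigsF f (PySem.Int.floordiv y 10)
    else []

def pvDigs (y : Int) : List Int := pvDigsF (y.toNat + 1) y

-- body of the "if r is not None: r += 1; if best is None or r < best: best = r"
-- update of B's loop: the new value of best from steps' result r and the old best
def pvStepMin (r : Option Int) (best : Option Int) : Option Int :=
  match r with
  | none => best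
  | some r0 =>
    match best with
    | none => some (r0 + 1)
    | some b => if r0 + 1 < b then some (r0 + 1) else best

-- steps(x) with its memo dict threaded through (returns (value, memo));
-- the inner 'for d in digs' loop is the fold; fuel as in dfsF
def pvStepsF : Nat → Int → Int → PySem.Dict Int (Option Int) →
    Option Int × PySem.Dict Int (Option Int)
  | 0, _, _, memo => (none, memo)
  | f + 1, n, x, memo =>
    let sz := pvSz x
    if sz = n then (some 0, memo)
    else if sz > n then (none, memo)
    else
      match memo.get? x with
      | some v => (v, memo)
      | none =>
        let p := (pvDigs x).foldl
          (fun (acc : Option Int × PySem.Dict Int (Option Int)) d =>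
            let q := pvStepsF f n (x * d) acc.2
            (pvStepMin q.1 acc.1, q.2))
          (none, memo)
        (p.1, p.2.insert x p.1)

def dfs_alt (n : Int) (num : Int) (cnt : Int) : Int :=
  let sz0 := pvSz num
  if sz0 = n then cnt
  else if sz0 > n then 1000000000
  else
    match (pvStepsF (4 * n.toNat + 5) n num PySem.Dict.empty).1 with
    | none => 1000000000
    | some s => min 1000000000 (cnt + s)

-- ===== PRECONDITION & SPEC =====
def Spec_dfs (n : Int) (num : Int) (cnt : Int) (out : Int) : Prop := out = dfs_alt n num cnt
instance (n : Int) (num : Int) (cnt : Int) (out : Int) : Decidable (Spec_dfs n num cnt out) := by unfold Spec_dfs; infer_instance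

-- ===== CLAIM (what is proved, stated in full; the proofs are below) =====
def Claim_equal_dfs : Prop := ∀ (n : Int) (num : Int) (cnt : Int), Dom_dfs n num cnt → Spec_dfs n num cnt (dfs n num cnt)

-- ===== LEMMAS AND PROOFS =====

theorem pv_core_lt : ∀ (f m : Nat), m < f → m < 10 ^ (Nat.toDigitsCore 10 f m []).length := by
  intro f
  induction f with
  | zero => intro m h; omega
  | succ f ih =>
    intro m h
    simp only [Nat.toDigitsCore]
    by_cases h0 : m / 10 = 0
    · simp [h0]; omega
    · rw [if_neg h0]
      rw [Nat.toDigitsCore_lens_eq]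
      have hm10 : m / 10 < f := by omega
      have := ih (m / 10) hm10
      calc m < 10 * (m / 10 + 1) := by omega
        _ ≤ 10 * 10 ^ (Nat.toDigitsCore 10 f (m / 10) []).length := by omega
        _ = 10 ^ ((Nat.toDigitsCore 10 f (m / 10) []).length + 1) := by ring

theorem pv_sz_nonneg (x : Int) : 0 ≤ pvSz x := by
  simp [pvSz, PySem.Str.len]

theorem pv_sz_lt_pow {x : Int} (hx : 0 < x) : x.toNat < 10 ^ (pvSz x).toNat := by
  have h1 : pvSz x = ((Nat.toDigits 10 x.toNat).length : Int) := by
    simp [pvSz, PySem.Str.len, PySem.Int.toList_toStr, PySem.Int.toChars, not_lt.mpr hx.le]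
  have h2 := pv_core_lt (x.toNat + 1) x.toNat (by omega)
  rw [h1]
  simpa [Nat.toDigits] using h2

theorem pvDigsF_congr : ∀ (f g : Nat) (y : Int), y.toNat < f → y.toNat < g →
    pvDigsF f y = pvDigsF g y := by
  intro f
  induction f with
  | zero => intro g y hf _; omega
  | succ f ih =>
    intro g y hf hg
    cases g with
    | zero => omega
    | succ g =>
      simp only [pvDigsF]
      by_cases hp : 0 < y
      · rw [if_pos hp, if_pos hp]
        have hlt : (PySem.Int.floordiv y 10).toNat < f ∧ (PySem.Int.floordiv y 10).toNat < g := by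
          rw [PySem.Int.floordiv_eq_ediv_of_pos (by norm_num)]; omega
        rw [ih g _ hlt.1 hlt.2]
      · rw [if_neg hp, if_neg hp]

theorem pvDigs_eq (y : Int) : pvDigs y =
    if 0 < y then
      (if 1 < PySem.Int.mod y 10 then [PySem.Int.mod y 10] else [])
        ++ pvDigs (PySem.Int.floordiv y 10)
    else [] := by
  show pvDigsF (y.toNat + 1) y = _
  simp only [pvDigsF]
  by_cases hp : 0 < y
  · rw [if_pos hp, if_pos hp]
    rw [pvDigsF_congr y.toNat ((PySem.Int.floordiv y 10).toNat + 1) _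
      (by rw [PySem.Int.floordiv_eq_ediv_of_pos (by norm_num)]; omega) (by omega)]
    rfl
  · rw [if_neg hp, if_neg hp]

theorem mem_pvDigs {d y : Int} (h : d ∈ pvDigs y) : 2 ≤ d ∧ d ≤ 9 ∧ 0 < y := by
  have H : ∀ (k : Nat) (y : Int), y.toNat ≤ k → ∀ d, d ∈ pvDigs y → 2 ≤ d ∧ d ≤ 9 ∧ 0 < y := by
    intro k
    induction k with
    | zero =>
      intro y hy d hd
      rw [pvDigs_eq] at hd
      have : ¬ 0 < y := by omega
      simp [this] at hd
    | succ k ih =>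
      intro y hy d hd
      rw [pvDigs_eq] at hd
      by_cases hp : 0 < y
      · rw [if_pos hp] at hd
        have hm : PySem.Int.mod y 10 = y % 10 := PySem.Int.mod_eq_emod_of_pos (by norm_num)
        rw [hm] at hd
        rcases List.mem_append.mp hd with h1 | h2
        · by_cases hgt : (1 : Int) < y % 10
          · rw [if_pos hgt] at h1
            rw [List.mem_singleton] at h1
            subst h1
            exact ⟨by omega, by omega, hp⟩
          · rw [if_neg hgt] at h1
            simp at h1
        · have hrec := ih (PySem.Int.floordiv y 10)
            (by rw [PySem.Int.floordiv_eq_ediv_of_pos (by norm_num)]; omega) d h2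
          exact ⟨hrec.1, hrec.2.1, hp⟩
      · simp [hp] at hd
  exact H y.toNat y le_rfl d h

theorem mem_pvGetLoopF : ∀ (f : Nat) (y : Int) (s : PySem.Set Int), y.toNat < f →
    ∀ v, v ∈ pvGetLoopF f y s ↔ v ∈ s ∨ v ∈ pvDigs y := by
  intro f
  induction f with
  | zero => intro y s hy v; omega
  | succ f ih =>
    intro y s hy v
    simp only [pvGetLoopF]
    rw [pvDigs_eq]
    by_cases hp : 0 < y
    · rw [if_pos hp, if_pos hp]
      have hm : PySem.Int.mod y 10 = y % 10 := PySem.Int.mod_eq_emod_of_pos (by norm_num)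
      rw [hm]
      rw [ih (PySem.Int.floordiv y 10) _
        (by rw [PySem.Int.floordiv_eq_ediv_of_pos (by norm_num)]; omega) v]
      by_cases hgt : (1 : Int) < y % 10
      · rw [if_pos hgt, if_pos hgt]
        rw [PySem.Set.mem_add]
        simp only [List.mem_append, List.mem_singleton]
        tauto
      · rw [if_neg hgt, if_neg hgt]
        simp
    · simp [hp]

theorem mem_pvGet {v x : Int} : v ∈ pvGet x ↔ v ∈ pvDigs x := by
  rw [pvGet, PySem.List.mem_sorted]
  rw [show pvGetLoop x PySem.Set.empty = pvGetLoopF (x.toNat + 1) x PySem.Set.empty from rfl]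
  rw [mem_pvGetLoopF (x.toNat + 1) x PySem.Set.empty (by omega) v]
  simp [PySem.Set.empty]

theorem pv_fuel_step {n x d : Int} {f : Nat} (hd : d ∈ pvDigs x)
    (hf : 10 ^ n.toNat ≤ x.toNat * 2 ^ (f + 1)) :
    10 ^ n.toNat ≤ (x * d).toNat * 2 ^ f := by
  obtain ⟨h2, _, hx⟩ := mem_pvDigs hd
  have hmul : x * 2 ≤ x * d := by
    exact mul_le_mul_of_nonneg_left (by omega) hx.le
  have ht : x.toNat * 2 ≤ (x * d).toNat := by omega
  calc 10 ^ n.toNat ≤ x.toNat * 2 ^ (f + 1) := hf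
    _ = (x.toNat * 2) * 2 ^ f := by ring
    _ ≤ (x * d).toNat * 2 ^ f := Nat.mul_le_mul_right _ ht

theorem pv_sz_big {n x : Int} (hx : 0 < x) (hbig : 10 ^ n.toNat ≤ x.toNat) :
    pvSz x > n := by
  have h1 := pv_sz_lt_pow hx
  have h2 := pv_sz_nonneg x
  by_contra hle
  have hszn : (pvSz x).toNat ≤ n.toNat := by omega
  have : (10 : Nat) ^ (pvSz x).toNat ≤ 10 ^ n.toNat := Nat.pow_le_pow_right (by norm_num) hszn
  omega

-- pure (memo-free) meaning of steps(x)
def gSteps (n : Int) (x : Int) : Option Int :=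
  if pvSz x = n then some 0
  else if pvSz x > n then none
  else
    (pvDigs x).attach.foldl
      (fun (acc : Option Int) d => pvStepMin (gSteps n (x * d.1)) acc)
      none
termination_by (10 ^ n.toNat - x.toNat : Nat)
decreasing_by
  have hd := d.2
  obtain ⟨h2, _, hx⟩ := mem_pvDigs hd
  have hsz : pvSz x < n := by omega
  have hszn : (pvSz x).toNat < n.toNat := by have := pv_sz_nonneg x; omega
  have hpow : 10 ^ (pvSz x).toNat < 10 ^ n.toNat := Nat.pow_lt_pow_right (by norm_num) hszn
  have hxp := pv_sz_lt_pow hx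
  have hmul : x < x * d.1 := by
    calc x = x * 1 := by ring
    _ < x * d.1 := by exact mul_lt_mul_of_pos_left (by omega) hx
  have ht : x.toNat < (x * d.1).toNat := by omega
  omega

-- A's value at a node below the top, as a function of the optimal step count
def pvT (c : Int) (o : Option Int) : Int :=
  match o with
  | none => 1000000000
  | some g => min 1000000000 (c + g)

theorem gSteps_none_of_big {n x : Int} (h : ¬ pvSz x = n) (h2 : pvSz x > n) :
    gSteps n x = none := by
  rw [gSteps, if_neg h, if_pos h2]

theorem pvfold_min_congr_cap {f g : Int → Int} :
    ∀ (l : List Int) (a : Int), a ≤ 1000000000 →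
    (∀ v ∈ l, min 1000000000 (f v) = min 1000000000 (g v)) →
    l.foldl (fun acc v => min acc (f v)) a = l.foldl (fun acc v => min acc (g v)) a := by
  intro l
  induction l with
  | nil => intro a _ _; rfl
  | cons v t ih =>
    intro a ha hfg
    have hv := hfg v (List.mem_cons_self)
    simp only [List.foldl_cons]
    rw [show min a (f v) = min a (g v) by omega]
    exact ih (min a (g v)) (by omega) (fun w hw => hfg w (List.mem_cons_of_mem _ hw))

theorem pvfold_min_le_init {f : Int → Int} :
    ∀ (l : List Int) (a : Int), l.foldl (fun acc v => min acc (f v)) a ≤ a := by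
  intro l
  induction l with
  | nil => intro a; simp
  | cons v t ih =>
    intro a
    simp only [List.foldl_cons]
    have := ih (min a (f v))
    omega

theorem pvfold_min_le_mem {f : Int → Int} :
    ∀ (l : List Int) (a : Int) (v : Int), v ∈ l → l.foldl (fun acc w => min acc (f w)) a ≤ f v := by
  intro l
  induction l with
  | nil => intro a v hv; simp at hv
  | cons w t ih =>
    intro a v hv
    simp only [List.foldl_cons]
    rcases List.mem_cons.mp hv with rfl | hv'
    · have := pvfold_min_le_init (f := f) t (min a (f v)); omega
    · exact ih _ v hv'

theorem pvfold_min_cases {f : Int → Int} :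
    ∀ (l : List Int) (a : Int), l.foldl (fun acc v => min acc (f v)) a = a ∨
      ∃ v ∈ l, l.foldl (fun acc w => min acc (f w)) a = f v := by
  intro l
  induction l with
  | nil => intro a; left; rfl
  | cons w t ih =>
    intro a
    simp only [List.foldl_cons]
    rcases ih (min a (f w)) with h | ⟨v, hv, h⟩
    · by_cases hc : f w < a
      · right; exact ⟨w, List.mem_cons_self, by omega⟩
      · left; omega
    · right; exact ⟨v, List.mem_cons_of_mem _ hv, h⟩

theorem pvfold_min_eq_of_mem_iff {f : Int → Int} {l₁ l₂ : List Int} (a : Int)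
    (h : ∀ v, v ∈ l₁ ↔ v ∈ l₂) :
    l₁.foldl (fun acc v => min acc (f v)) a = l₂.foldl (fun acc v => min acc (f v)) a := by
  have le12 : l₁.foldl (fun acc v => min acc (f v)) a ≤ l₂.foldl (fun acc v => min acc (f v)) a := by
    rcases pvfold_min_cases (f := f) l₂ a with h2 | ⟨v, hv, h2⟩
    · rw [h2]; exact pvfold_min_le_init _ _
    · rw [h2]; exact pvfold_min_le_mem _ _ v ((h v).mpr hv)
  have le21 : l₂.foldl (fun acc v => min acc (f v)) a ≤ l₁.foldl (fun acc v => min acc (f v)) a := by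
    rcases pvfold_min_cases (f := f) l₁ a with h2 | ⟨v, hv, h2⟩
    · rw [h2]; exact pvfold_min_le_init _ _
    · rw [h2]; exact pvfold_min_le_mem _ _ v ((h v).mp hv)
  omega

theorem pvfold_opt {c : Int} {S : Int → Option Int} :
    ∀ (l : List Int) (acc : Option Int) (a : Int), pvT c acc = a → a ≤ 1000000000 →
    pvT c (l.foldl (fun (acc : Option Int) v => pvStepMin (S v) acc) acc) =
    l.foldl (fun b v => min b (pvT (c + 1) (S v))) a := by
  intro l
  induction l with
  | nil => intro acc a h _; simpa using h
  | cons v t ih =>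
    intro acc a h ha
    simp only [List.foldl_cons]
    refine ih _ (min a (pvT (c + 1) (S v))) ?_ (by omega)
    cases hS : S v with
    | none =>
      show pvT c acc = min a (pvT (c + 1) none)
      rw [h]
      show a = min a 1000000000
      omega
    | some r0 =>
      cases acc with
      | none =>
        show pvT c (some (r0 + 1)) = min a (pvT (c + 1) (some r0))
        have ha' : a = 1000000000 := by rw [← h]; rfl
        show min 1000000000 (c + (r0 + 1)) = min a (min 1000000000 (c + 1 + r0))
        omega
      | some b =>
        show pvT c (if r0 + 1 < b then some (r0 + 1) else some b)
            = min a (pvT (c + 1) (some r0))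
        have hb : min 1000000000 (c + b) = a := h
        by_cases hlt : r0 + 1 < b
        · rw [if_pos hlt]
          show min 1000000000 (c + (r0 + 1)) = min a (min 1000000000 (c + 1 + r0))
          omega
        · rw [if_neg hlt]
          show min 1000000000 (c + b) = min a (min 1000000000 (c + 1 + r0))
          omega

theorem dfsF_eq (n : Int) : ∀ (f : Nat) (x c : Int),
    (0 < x → 10 ^ n.toNat ≤ x.toNat * 2 ^ f) → (x ≤ 0 → 1 ≤ f) →
    dfsF f n x c = if pvSz x = n then c else pvT c (gSteps n x) := by
  intro f
  induction f with
  | zero =>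
    intro x c hbig hpos
    have hx : 0 < x := by by_contra h; have := hpos (by omega); omega
    have hb : 10 ^ n.toNat ≤ x.toNat := by have := hbig hx; simpa using this
    have hgt := pv_sz_big hx hb
    have hne : ¬ pvSz x = n := by omega
    rw [if_neg hne, gSteps_none_of_big hne hgt]
    rfl
  | succ f ih =>
    intro x c hbig hpos
    simp only [dfsF]
    by_cases h1 : pvSz x = n
    · rw [if_pos h1, if_pos h1]
    · rw [if_neg h1, if_neg h1]
      by_cases h2 : pvSz x > n
      · rw [if_pos h2, gSteps_none_of_big h1 h2]
        rfl
      · rw [if_neg h2]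
        rw [PySem.List.foldl_congr_mem (pvGet x) _
          (fun ans v => min ans
            (if pvSz (x * v) = n then c + 1 else pvT (c + 1) (gSteps n (x * v))))
          1000000000
          (by
            intro acc v hv
            have hd := mem_pvGet.mp hv
            obtain ⟨hv2, _, hx⟩ := mem_pvDigs hd
            have hrec := ih (x * v) (c + 1)
              (fun _ => pv_fuel_step hd (hbig hx)) (by intro h; nlinarith)
            rw [hrec]
            beta_reduce
            omega)]
        rw [pvfold_min_congr_cap (g := fun v => pvT (c + 1) (gSteps n (x * v)))
          (pvGet x) 1000000000 (by omega)
          (by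
            intro v _
            by_cases hleaf : pvSz (x * v) = n
            · have hg : gSteps n (x * v) = some 0 := by
                rw [gSteps]
                rw [if_pos hleaf]
              rw [if_pos hleaf]
              beta_reduce
              rw [hg]
              show min 1000000000 (c + 1) = min 1000000000 (min 1000000000 (c + 1 + 0))
              omega
            · rw [if_neg hleaf])]
        rw [pvfold_min_eq_of_mem_iff (f := fun v => pvT (c + 1) (gSteps n (x * v)))
          1000000000 (fun v => mem_pvGet)]
        rw [← pvfold_opt (S := fun v => gSteps n (x * v)) (pvDigs x) none 1000000000 rfl (by omega)]
        rw [gSteps, if_neg h1, if_neg h2]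
        rw [List.foldl_attach (f := fun (acc : Option Int) v => pvStepMin (gSteps n (x * v)) acc)]

def pvGood (n : Int) (m : PySem.Dict Int (Option Int)) : Prop :=
  ∀ k v, m.get? k = some v → v = gSteps n k

theorem pvStepsF_eq (n : Int) : ∀ (f : Nat) (x : Int) (m : PySem.Dict Int (Option Int)),
    (0 < x → 10 ^ n.toNat ≤ x.toNat * 2 ^ f) → (x ≤ 0 → 1 ≤ f) → pvGood n m →
    (pvStepsF f n x m).1 = gSteps n x ∧ pvGood n (pvStepsF f n x m).2 := by
  intro f
  induction f with
  | zero =>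
    intro x m hbig hpos hg
    have hx : 0 < x := by by_contra h; have := hpos (by omega); omega
    have hb : 10 ^ n.toNat ≤ x.toNat := by have := hbig hx; simpa using this
    have hgt := pv_sz_big hx hb
    have hne : ¬ pvSz x = n := by omega
    rw [gSteps_none_of_big hne hgt]
    exact ⟨rfl, hg⟩
  | succ f ih =>
    intro x m hbig hpos hg
    simp only [pvStepsF]
    by_cases h1 : pvSz x = n
    · rw [if_pos h1]
      refine ⟨?_, hg⟩
      rw [gSteps, if_pos h1]
    · rw [if_neg h1]
      by_cases h2 : pvSz x > n
      · rw [if_pos h2]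
        refine ⟨?_, hg⟩
        rw [gSteps_none_of_big h1 h2]
      · rw [if_neg h2]
        have hgs : gSteps n x = (pvDigs x).attach.foldl
            (fun (acc : Option Int) d => pvStepMin (gSteps n (x * d.1)) acc) none := by
          rw [gSteps, if_neg h1, if_neg h2]
        have hgs' : gSteps n x = (pvDigs x).foldl
            (fun (acc : Option Int) d => pvStepMin (gSteps n (x * d)) acc) none := by
          rw [hgs, List.foldl_attach (f := fun (acc : Option Int) v => pvStepMin (gSteps n (x * v)) acc)]
        cases hmx : m.get? x with
        | some v =>
          exact ⟨hg x v hmx, hg⟩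
        | none =>
          have aux : ∀ (l : List Int), (∀ d ∈ l, d ∈ pvDigs x) →
              ∀ (acc : Option Int × PySem.Dict Int (Option Int)), pvGood n acc.2 →
              (l.foldl (fun acc d =>
                  let q := pvStepsF f n (x * d) acc.2
                  (pvStepMin q.1 acc.1, q.2)) acc).1
                = l.foldl (fun (b : Option Int) d => pvStepMin (gSteps n (x * d)) b) acc.1 ∧
              pvGood n (l.foldl (fun acc d =>
                  let q := pvStepsF f n (x * d) acc.2
                  (pvStepMin q.1 acc.1, q.2)) acc).2 := by
            intro l
            induction l with
            | nil => intro _ acc h; exact ⟨rfl, h⟩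
            | cons d t ihl =>
              intro hl acc h
              simp only [List.foldl_cons]
              have hd : d ∈ pvDigs x := hl d List.mem_cons_self
              obtain ⟨hd2, _, hx⟩ := mem_pvDigs hd
              have hrec := ih (x * d) acc.2
                (fun _ => pv_fuel_step hd (hbig hx)) (by intro h'; nlinarith) h
              rw [hrec.1]
              exact ihl (fun e he => hl e (List.mem_cons_of_mem _ he)) _ hrec.2
          have ha := aux (pvDigs x) (fun _ h => h) (none, m) hg
          refine ⟨?_, ?_⟩
          · exact ha.1.trans hgs'.symm
          · intro kk vv hkv
            have hkv' : ((((pvDigs x).foldl (fun acc d =>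
                  let q := pvStepsF f n (x * d) acc.2
                  (pvStepMin q.1 acc.1, q.2)) (none, m)).2).insert x
                  (((pvDigs x).foldl (fun acc d =>
                  let q := pvStepsF f n (x * d) acc.2
                  (pvStepMin q.1 acc.1, q.2)) (none, m)).1)).get? kk = some vv := hkv
            rw [PySem.Dict.get?_insert] at hkv'
            by_cases hkx : kk = x
            · rw [if_pos hkx] at hkv'
              have hv : vv = ((pvDigs x).foldl (fun acc d =>
                  let q := pvStepsF f n (x * d) acc.2
                  (pvStepMin q.1 acc.1, q.2)) (none, m)).1 := by
                cases hkv'; rfl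
              rw [hv, hkx]
              exact ha.1.trans hgs'.symm
            · rw [if_neg hkx] at hkv'
              exact ha.2 kk vv hkv'

theorem pv_fuel_top (n x : Int) (hx : 0 < x) :
    10 ^ n.toNat ≤ x.toNat * 2 ^ (4 * n.toNat + 5) := by
  have h1 : (10 : Nat) ^ n.toNat ≤ 16 ^ n.toNat := Nat.pow_le_pow_left (by norm_num) _
  have h2 : (16 : Nat) ^ n.toNat = 2 ^ (4 * n.toNat) := by
    rw [show (16 : Nat) = 2 ^ 4 from rfl, ← Nat.pow_mul]
  have h3 : (2 : Nat) ^ (4 * n.toNat) ≤ 2 ^ (4 * n.toNat + 5) :=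
    Nat.pow_le_pow_right (by norm_num) (by omega)
  have h4 : 1 ≤ x.toNat := by omega
  calc (10 : Nat) ^ n.toNat ≤ 2 ^ (4 * n.toNat + 5) := by omega
    _ ≤ x.toNat * 2 ^ (4 * n.toNat + 5) := Nat.le_mul_of_pos_left _ (by omega)

-- ===== VERDICT (by name: the statement is the Claim_ definition above) =====
theorem dfs_spec : Claim_equal_dfs := by
  intro n num cnt _
  unfold Spec_dfs
  show dfsF (4 * n.toNat + 5) n num cnt = dfs_alt n num cnt
  rw [dfsF_eq n (4 * n.toNat + 5) num cnt (pv_fuel_top n num) (fun _ => by omega)]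
  rw [dfs_alt]
  by_cases h1 : pvSz num = n
  · simp [h1]
  · rw [if_neg h1, if_neg h1]
    by_cases h2 : pvSz num > n
    · rw [if_pos h2]
      rw [gSteps_none_of_big h1 h2]
      rfl
    · rw [if_neg h2]
      have hgood : pvGood n PySem.Dict.empty := by
        intro k v h; rw [PySem.Dict.get?_empty] at h; cases h
      rw [(pvStepsF_eq n (4 * n.toNat + 5) num PySem.Dict.empty
        (pv_fuel_top n num) (fun _ => by omega) hgood).1]
      cases gSteps n num with
      | none => rfl
      | some s => rfl
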